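-- pv_equiv track=rewrite | github.com/dinoopitstudios/DinoAir | tools/pseudocode_translator/validator/utils.py | extract_code_metrics
-- ===== SOURCE A (Python) =====
-- def extract_code_metrics(code: str) -> dict[str, int]:
--     """
--     Extract basic metrics from code.
--
--     Args:
--         code: Python code string
--
--     Returns:
--         Dictionary with code metrics
--     """
--     lines = code.split("\n")
--
--     # Count different types of lines
--     total_lines = len(lines)
--     blank_lines = sum(1 for line in lines if not line.strip())
--     comment_lines = sum(1 for line in lines if line.strip().startswith("#"))
--     code_lines = total_lines - blank_lines - comment_lines
--
--     # Calculate average line length (excluding blank lines)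
--     non_blank_lines = [line for line in lines if line.strip()]
--     avg_line_length = sum(len(line) for line in non_blank_lines) // max(len(non_blank_lines), 1)
--
--     # Find longest line
--     max_line_length = max(len(line) for line in lines) if lines else 0
--
--     return {
--         "total_lines": total_lines,
--         "blank_lines": blank_lines,
--         "comment_lines": comment_lines,
--         "code_lines": code_lines,
--         "avg_line_length": avg_line_length,
--         "max_line_length": max_line_length,
--     }
-- ===== SOURCE B (Python) =====
-- def extract_code_metrics(code: str) -> dict[str, int]:
--     """Single-pass re-implementation: one loop maintains all counters."""
--     total = blank = comment = nonblank = nonblank_len = max_len = 0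
--     for line in code.split("\n"):
--         total += 1
--         n = len(line)
--         if n > max_len:
--             max_len = n
--         stripped = line.strip()
--         if not stripped:
--             blank += 1
--         else:
--             nonblank += 1
--             nonblank_len += n
--             if stripped.startswith("#"):
--                 comment += 1
--     return {
--         "total_lines": total,
--         "blank_lines": blank,
--         "comment_lines": comment,
--         "code_lines": total - blank - comment,
--         "avg_line_length": nonblank_len // max(nonblank, 1),
--         "max_line_length": max_len,
--     }
-- ===== Notes on version B (the rewrite author's own statement) =====
-- stated objective: simpler
-- what changed: Replaced A's five separate passes over the line list (two generator sums, a filter, a second sum and a max) with a single loop that maintains all counters at once and derives code_lines and the average afterwards.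
import Mathlib
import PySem

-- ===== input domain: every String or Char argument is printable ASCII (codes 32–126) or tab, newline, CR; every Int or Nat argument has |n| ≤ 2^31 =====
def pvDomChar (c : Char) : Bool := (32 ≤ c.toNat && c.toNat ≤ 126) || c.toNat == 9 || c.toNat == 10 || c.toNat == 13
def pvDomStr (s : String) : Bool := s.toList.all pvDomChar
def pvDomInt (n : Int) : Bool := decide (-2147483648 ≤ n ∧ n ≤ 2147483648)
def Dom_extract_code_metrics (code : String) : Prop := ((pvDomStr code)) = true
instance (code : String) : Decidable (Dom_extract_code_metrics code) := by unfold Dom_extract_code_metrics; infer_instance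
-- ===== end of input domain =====

-- B fuses A's five passes over the lines into one fold maintaining all counters (objective: simpler).

-- ===== PORT A =====
def extract_code_metrics (code : String) : List (String × Int) :=
  let lines := PySem.Chars.splitOn code.toList ['\n']
  let total_lines : Int := lines.length
  let blank_lines : Int := lines.countP (fun line => (PySem.Chars.strip line).isEmpty)
  let comment_lines : Int := lines.countP (fun line => PySem.Chars.startswith (PySem.Chars.strip line) ['#'])
  let code_lines : Int := total_lines - blank_lines - comment_lines
  let non_blank_lines := lines.filter (fun line => !(PySem.Chars.strip line).isEmpty)
  let avg_line_length : Int :=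
    PySem.Int.floordiv ((non_blank_lines.map (fun l => (l.length : Int))).sum)
      (max (non_blank_lines.length : Int) 1)
  let max_line_length : Int :=
    if lines.isEmpty then 0
    else (PySem.List.max? (lines.map (fun l => (l.length : Int))) id).getD 0
  [("total_lines", total_lines), ("blank_lines", blank_lines),
   ("comment_lines", comment_lines), ("code_lines", code_lines),
   ("avg_line_length", avg_line_length), ("max_line_length", max_line_length)]

-- ===== PORT B =====
def extract_code_metrics_alt (code : String) : List (String × Int) :=
  let st := (PySem.Chars.splitOn code.toList ['\n']).foldl
    (fun (s : Int × Int × Int × Int × Int × Int) line =>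
      let n : Int := line.length
      let m' := if n > s.2.2.2.2.2 then n else s.2.2.2.2.2
      let stripped := PySem.Chars.strip line
      if stripped.isEmpty then
        (s.1 + 1, s.2.1 + 1, s.2.2.1, s.2.2.2.1, s.2.2.2.2.1, m')
      else
        (s.1 + 1, s.2.1,
         s.2.2.1 + (if PySem.Chars.startswith stripped ['#'] then 1 else 0),
         s.2.2.2.1 + 1, s.2.2.2.2.1 + n, m'))
    (0, 0, 0, 0, 0, 0)
  [("total_lines", st.1), ("blank_lines", st.2.1),
   ("comment_lines", st.2.2.1), ("code_lines", st.1 - st.2.1 - st.2.2.1),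
   ("avg_line_length", PySem.Int.floordiv st.2.2.2.2.1 (max st.2.2.2.1 1)),
   ("max_line_length", st.2.2.2.2.2)]

-- ===== PRECONDITION & SPEC =====
def Spec_extract_code_metrics (code : String) (out : List (String × Int)) : Prop := out = extract_code_metrics_alt code
instance (code : String) (out : List (String × Int)) : Decidable (Spec_extract_code_metrics code out) := by unfold Spec_extract_code_metrics; infer_instance

-- ===== CLAIM (what is proved, stated in full; the proofs are below) =====
def Claim_equal_extract_code_metrics : Prop := ∀ (code : String), Dom_extract_code_metrics code → Spec_extract_code_metrics code (extract_code_metrics code)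

-- ===== LEMMAS AND PROOFS =====

-- a list whose stripped form is empty does not start with '#'
lemma blank_not_comment (line : List Char) (h : (PySem.Chars.strip line).isEmpty = true) :
    PySem.Chars.startswith (PySem.Chars.strip line) ['#'] = false := by
  rw [List.isEmpty_iff] at h
  rw [h]
  simp [Bool.eq_false_iff, PySem.Chars.startswith_iff]

-- B's fold computes A's five aggregates in one pass
lemma fold_spec (ls : List (List Char)) :
    ∀ (t b c nb s m : Int),
    ls.foldl
      (fun (s : Int × Int × Int × Int × Int × Int) line =>
        let n : Int := line.length
        let m' := if n > s.2.2.2.2.2 then n else s.2.2.2.2.2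
        let stripped := PySem.Chars.strip line
        if stripped.isEmpty then
          (s.1 + 1, s.2.1 + 1, s.2.2.1, s.2.2.2.1, s.2.2.2.2.1, m')
        else
          (s.1 + 1, s.2.1,
           s.2.2.1 + (if PySem.Chars.startswith stripped ['#'] then 1 else 0),
           s.2.2.2.1 + 1, s.2.2.2.2.1 + n, m'))
      (t, b, c, nb, s, m) =
    (t + ls.length,
     b + ls.countP (fun line => (PySem.Chars.strip line).isEmpty),
     c + ls.countP (fun line => PySem.Chars.startswith (PySem.Chars.strip line) ['#']),
     nb + ls.countP (fun line => !(PySem.Chars.strip line).isEmpty),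
     s + ((ls.filter (fun line => !(PySem.Chars.strip line).isEmpty)).map (fun l => (l.length : Int))).sum,
     ls.foldl (fun acc (l : List Char) => if (l.length : Int) > acc then (l.length : Int) else acc) m) := by
  induction ls with
  | nil => intro t b c nb s m; simp
  | cons hd tl ih =>
    intro t b c nb s m
    by_cases hb : (PySem.Chars.strip hd).isEmpty = true
    · simp only [List.foldl_cons, List.countP_cons, List.filter_cons, hb,
        blank_not_comment hd hb, ih]
      refine Prod.ext ?_ (Prod.ext ?_ (Prod.ext ?_ (Prod.ext ?_ (Prod.ext ?_ rfl)))) <;>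
        simp <;> ring
    · simp only [List.foldl_cons, List.countP_cons, List.filter_cons,
        Bool.not_eq_true] at hb ⊢
      simp only [hb, ih, Bool.not_false, if_true, if_false, Bool.false_eq_true, List.map_cons,
        List.sum_cons]
      refine Prod.ext ?_ (Prod.ext ?_ (Prod.ext ?_ (Prod.ext ?_ (Prod.ext ?_ rfl)))) <;>
        simp <;> ring

-- the running max written with > equals foldl max
lemma foldl_ite_eq_foldl_max (ls : List (List Char)) (m : Int) :
    ls.foldl (fun acc (l : List Char) => if (l.length : Int) > acc then (l.length : Int) else acc) m
      = ls.foldl (fun acc (l : List Char) => max acc (l.length : Int)) m := by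
  have h : (fun acc (l : List Char) => if (l.length : Int) > acc then (l.length : Int) else acc)
      = fun acc (l : List Char) => max acc (l.length : Int) := by
    funext a l
    simp only [gt_iff_lt, max_def]
    split_ifs <;> omega
  rw [h]

-- Python's max over a nonempty list of ints equals a left fold of max
lemma max?_cons_eq : ∀ (xs : List Int) (x : Int),
    PySem.List.max? (x :: xs) id = some (List.foldl max x xs) := by
  intro xs
  induction xs with
  | nil => intro x; rfl
  | cons y t ih =>
    intro x
    have h : PySem.List.max? (x :: y :: t) id = PySem.List.max? (max x y :: t) id := by
      simp only [PySem.List.max?, List.foldl_cons]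
      congr 1
      simp only [id, max_def]
      split_ifs <;> first | rfl | (congr 1; omega)
    rw [h, ih, List.foldl_cons]

lemma pymax_cons (x : Int) (xs : List Int) :
    (PySem.List.max? (x :: xs) id).getD 0 = xs.foldl max x := by
  rw [max?_cons_eq]
  rfl

-- ===== VERDICT (by name: the statement is the Claim_ definition above) =====
theorem extract_code_metrics_spec : Claim_equal_extract_code_metrics := by
  unfold Claim_equal_extract_code_metrics
  intro code _
  unfold Spec_extract_code_metrics
  simp only [extract_code_metrics, extract_code_metrics_alt]
  rw [fold_spec]
  cases hls : PySem.Chars.splitOn code.toList ['\n'] with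
  | nil => simp
  | cons hd tl =>
    simp only [List.isEmpty_cons, List.map_cons, pymax_cons, List.length_cons,
      List.countP_eq_length_filter, zero_add, if_false, Bool.false_eq_true]
    norm_num [List.cons.injEq, Prod.mk.injEq, List.countP_eq_length_filter, List.foldl_map,
      foldl_ite_eq_foldl_max, max_eq_right (Int.natCast_nonneg hd.length)]
    congr 1
    split_ifs with h
    · rfl
    · omega
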